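-- pv_equiv track=rewrite | github.com/ChrisNosowsky/CSE-231 | Projects/proj09/proj09.py | fitness_calculator
-- ===== SOURCE A (Python) =====
-- def fitness_calculator(potential_plaintext, quadgram_dictionary):
--     endpt = 4 #since we are taking every 4, this is the starting enpoint
--     start = 0
--     quads_all = []
--     total = 0
--     while True:
--         if endpt <= len(potential_plaintext):
--            quad = potential_plaintext[start:endpt]
--            start += 1
--            endpt +=1
--            quads_all.append(quad)
--         else:
--             break
--     for key,val in quadgram_dictionary.items():
--         if key in quads_all:
--             total += val[1]
--         else:
--             continue
--     return total
-- ===== SOURCE B (Python) =====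
-- def fitness_calculator(potential_plaintext, quadgram_dictionary):
--     quads = {potential_plaintext[i:i + 4] for i in range(len(potential_plaintext) - 3)}
--     return sum(quadgram_dictionary[q][1] for q in quads if q in quadgram_dictionary)
-- ===== Notes on version B (the rewrite author's own statement) =====
-- stated objective: faster
-- what changed: A builds the full sliding-window list and scans it linearly for every dictionary key; B builds a set of the distinct quadgrams once and sums direct dictionary lookups over that set.
import Mathlib
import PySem

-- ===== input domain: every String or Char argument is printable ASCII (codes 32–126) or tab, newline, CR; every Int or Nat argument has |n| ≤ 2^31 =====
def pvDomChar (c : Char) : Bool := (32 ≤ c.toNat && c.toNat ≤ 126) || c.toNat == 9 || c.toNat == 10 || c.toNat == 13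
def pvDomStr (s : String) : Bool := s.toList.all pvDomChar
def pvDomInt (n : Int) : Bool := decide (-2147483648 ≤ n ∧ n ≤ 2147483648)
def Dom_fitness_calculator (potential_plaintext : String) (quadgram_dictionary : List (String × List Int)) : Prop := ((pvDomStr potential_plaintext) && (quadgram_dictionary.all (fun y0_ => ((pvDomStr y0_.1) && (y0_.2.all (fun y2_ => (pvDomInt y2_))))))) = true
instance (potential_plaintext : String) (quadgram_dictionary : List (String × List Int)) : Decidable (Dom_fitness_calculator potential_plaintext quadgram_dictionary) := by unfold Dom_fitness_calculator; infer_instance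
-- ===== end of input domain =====

-- B replaces A's sliding-window list + per-dict-key list scan by a set of the distinct quadgrams
-- with direct dictionary lookups (objective: faster by a better data structure).
-- The quadgram_dictionary parameter is a Python dict, modelled as an association list decoded by
-- PySem.Dict.ofList in both ports (later duplicates overwrite, Python dict construction).

-- ===== PORT A =====
-- A's while-loop collecting potential_plaintext[start:start+4] while start+4 <= len; Strings are
-- handled through .toList (String equality coincides with List Char equality).
-- fuel (cs.length + 1 at the call site) only makes the loop structurally total; the break is A's test
def pvQuadsA (cs : List Char) (fuel start : Nat) : List (List Char) :=
  match fuel with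
  | 0 => []
  | f + 1 =>
    if start + 4 ≤ cs.length then
      PySem.List.slice cs (some (start : Int)) (some ((start : Int) + 4)) :: pvQuadsA cs f (start + 1)
    else []

def fitness_calculator (potential_plaintext : String) (quadgram_dictionary : List (String × List Int)) : Int :=
  let cs := potential_plaintext.toList
  let quads_all := pvQuadsA cs (cs.length + 1) 0
  (PySem.Dict.ofList quadgram_dictionary).items.foldl
    (fun total kv =>
      if quads_all.contains kv.1.toList then total + PySem.List.pyGetD kv.2 1 0 else total) 0

-- ===== PORT B =====
-- Source B: quads = {s[i:i+4] for i in range(len(s)-3)}; sum(d[q][1] for q in quads if q in d)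
def fitness_calculator_alt (potential_plaintext : String) (quadgram_dictionary : List (String × List Int)) : Int :=
  let cs := potential_plaintext.toList
  let d := PySem.Dict.ofList quadgram_dictionary
  let quads : List (List Char) := PySem.Set.ofList
    ((PySem.List.pyRange 0 (PySem.List.len cs - 3) 1).map
      (fun i => PySem.List.slice cs (some i) (some (i + 4))))
  quads.foldl
    (fun t q =>
      if d.contains (String.ofList q) then t + PySem.List.pyGetD (d.getD (String.ofList q) []) 1 0
      else t) 0

-- ===== PRECONDITION & SPEC =====
-- A evaluates val[1] for every dict entry whose key occurs as one of the length-4 windows of the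
-- plaintext: Pre_ excludes exactly the inputs where that raises IndexError (a matched value with < 2 items).
def Pre_fitness_calculator (potential_plaintext : String) (quadgram_dictionary : List (String × List Int)) : Prop :=
  ∀ kv ∈ (PySem.Dict.ofList quadgram_dictionary).items,
    (∃ k < potential_plaintext.toList.length, k + 4 ≤ potential_plaintext.toList.length ∧
        kv.1.toList = (potential_plaintext.toList.drop k).take 4) → 2 ≤ kv.2.length
instance (potential_plaintext : String) (quadgram_dictionary : List (String × List Int)) : Decidable (Pre_fitness_calculator potential_plaintext quadgram_dictionary) := by unfold Pre_fitness_calculator; infer_instance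

def pvWitness_fitness_calculator : String × (List (String × List Int)) :=
  ("ABCDE", [("ABCD", [3, 7]), ("XYZW", [1, 2])])

def Spec_fitness_calculator (potential_plaintext : String) (quadgram_dictionary : List (String × List Int)) (out : Int) : Prop := out = fitness_calculator_alt potential_plaintext quadgram_dictionary
instance (potential_plaintext : String) (quadgram_dictionary : List (String × List Int)) (out : Int) : Decidable (Spec_fitness_calculator potential_plaintext quadgram_dictionary out) := by unfold Spec_fitness_calculator; infer_instance

-- ===== CLAIM (what is proved, stated in full; the proofs are below) =====
def Claim_equal_fitness_calculator : Prop := ∀ (potential_plaintext : String) (quadgram_dictionary : List (String × List Int)), Dom_fitness_calculator potential_plaintext quadgram_dictionary → Pre_fitness_calculator potential_plaintext quadgram_dictionary → Spec_fitness_calculator potential_plaintext quadgram_dictionary (fitness_calculator potential_plaintext quadgram_dictionary)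

-- ===== LEMMAS AND PROOFS =====

-- the slice A takes each turn is a drop/take window
lemma pv_sliceA_eq (cs : List Char) (k : Nat) :
    PySem.List.slice cs (some (k : Int)) (some ((k : Int) + 4)) = (cs.drop k).take 4 := by
  have h := PySem.List.slice_natCast_add cs k 4
  simpa using h

lemma pv_mem_pvQuadsA (cs : List Char) (q : List Char) : ∀ (fuel s : Nat),
    cs.length ≤ fuel + s →
    (q ∈ pvQuadsA cs fuel s ↔ ∃ k, s ≤ k ∧ k + 4 ≤ cs.length ∧ q = (cs.drop k).take 4) := by
  intro fuel
  induction fuel with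
  | zero =>
    intro s hs
    simp only [pvQuadsA, List.not_mem_nil, false_iff]
    rintro ⟨k, hk1, hk2, _⟩; omega
  | succ f ih =>
    intro s hs
    rw [pvQuadsA]
    by_cases h : s + 4 ≤ cs.length
    · simp only [h, if_pos, List.mem_cons, pv_sliceA_eq]
      rw [ih (s+1) (by omega)]
      constructor
      · rintro (rfl | ⟨k, hk1, hk2, rfl⟩)
        · exact ⟨s, le_rfl, h, rfl⟩
        · exact ⟨k, by omega, hk2, rfl⟩
      · rintro ⟨k, hk1, hk2, rfl⟩
        rcases eq_or_lt_of_le hk1 with rfl | hlt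
        · exact Or.inl rfl
        · exact Or.inr ⟨k, by omega, hk2, rfl⟩
    · simp only [h, if_neg, not_false_iff, List.not_mem_nil, false_iff]
      rintro ⟨k, hk1, hk2, _⟩; omega

lemma pv_mem_windowsB (cs : List Char) (q : List Char) :
    q ∈ ((PySem.List.pyRange 0 (PySem.List.len cs - 3) 1).map
          (fun i => PySem.List.slice cs (some i) (some (i + 4)))) ↔
      ∃ k, k + 4 ≤ cs.length ∧ q = (cs.drop k).take 4 := by
  simp only [List.mem_map, PySem.List.mem_pyRange_one, PySem.List.len_eq]
  constructor
  · rintro ⟨i, ⟨hi0, hi1⟩, rfl⟩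
    refine ⟨i.toNat, by omega, ?_⟩
    have hi' : i = ((i.toNat : Nat) : Int) := by omega
    rw [hi', pv_sliceA_eq]
    simp [max_eq_left hi0]
  · rintro ⟨k, hk, rfl⟩
    exact ⟨(k : Int), ⟨by omega, by omega⟩, pv_sliceA_eq cs k⟩

-- a quadgram is in A's window list iff it is in B's (pre-dedup) window list
lemma pv_windows_agree (cs : List Char) (q : List Char) :
    q ∈ pvQuadsA cs (cs.length + 1) 0 ↔
      q ∈ ((PySem.List.pyRange 0 (PySem.List.len cs - 3) 1).map
            (fun i => PySem.List.slice cs (some i) (some (i + 4)))) := by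
  rw [pv_mem_pvQuadsA cs q (cs.length + 1) 0 (by omega), pv_mem_windowsB]
  constructor
  · rintro ⟨k, _, h2, h3⟩; exact ⟨k, h2, h3⟩
  · rintro ⟨k, h2, h3⟩; exact ⟨k, Nat.zero_le _, h2, h3⟩

-- an accumulate-if loop is the sum over the filtered, mapped list
lemma pv_foldl_if_add {α : Type} (P : α → Bool) (f : α → Int) :
    ∀ (l : List α) (init : Int),
      l.foldl (fun t x => if P x then t + f x else t) init
        = init + ((l.filter P).map f).sum := by
  intro l
  induction l with
  | nil => intro init; simp
  | cons x xs ih =>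
    intro init
    by_cases h : P x = true
    · simp [h, ih]
      omega
    · simp [h, ih]

-- ===== VERDICT (by name: the statement is the Claim_ definition above) =====
theorem fitness_calculator_spec : Claim_equal_fitness_calculator := by
  intro pp qd _hDom _hPre
  unfold Spec_fitness_calculator fitness_calculator fitness_calculator_alt
  simp only [pv_foldl_if_add, zero_add]
  set cs := pp.toList with hcs
  set d := PySem.Dict.ofList qd with hd
  set W := ((PySem.List.pyRange 0 (PySem.List.len cs - 3) 1).map
      (fun i => PySem.List.slice cs (some i) (some (i + 4)))) with hW
  have hnd : d.keys.Nodup := PySem.Dict.nodup_keys_ofList qd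
  set LA := d.items.filter (fun kv => (pvQuadsA cs (cs.length + 1) 0).contains kv.1.toList) with hLA
  set LB := (PySem.Set.ofList W).filter (fun q => d.contains (String.ofList q)) with hLB
  have hmapA : LA.map (fun kv => PySem.List.pyGetD kv.2 1 0)
      = (LA.map (fun kv => kv.1.toList)).map
          (fun q => PySem.List.pyGetD (d.getD (String.ofList q) []) 1 0) := by
    rw [List.map_map]
    apply List.map_congr_left
    intro kv hkv
    have hmem : (kv.1, kv.2) ∈ d.items := by
      simpa using List.mem_of_mem_filter hkv
    simp only [Function.comp]
    rw [show String.ofList kv.1.toList = kv.1 by simp,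
        PySem.Dict.getD_of_mem_items d hmem hnd]
  have hQW : ∀ q : List Char, (pvQuadsA cs (cs.length + 1) 0).contains q = true ↔ q ∈ PySem.Set.ofList W := by
    intro q
    rw [List.contains_iff_mem, PySem.Set.mem_ofList, hW]
    exact pv_windows_agree cs q
  have hcontains : ∀ q : List Char,
      d.contains (String.ofList q) = true ↔ ∃ kv ∈ d.items, kv.1 = String.ofList q := by
    intro q
    rw [PySem.Dict.contains_iff_mem_keys]
    simp only [PySem.Dict.keys, List.mem_map]
  have hperm : (LA.map (fun kv => kv.1.toList)).Perm LB := by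
    have hsub : (LA.map (fun kv : String × List Int => kv.1)).Sublist d.keys := by
      simp only [PySem.Dict.keys, hLA]
      exact (List.filter_sublist).map _
    have hn1 : (LA.map (fun kv : String × List Int => kv.1)).Nodup := hsub.nodup hnd
    have h1 : (LA.map (fun kv => kv.1.toList)).Nodup := by
      have hmm : LA.map (fun kv => kv.1.toList)
          = (LA.map (fun kv : String × List Int => kv.1)).map String.toList := by
        rw [List.map_map]; rfl
      rw [hmm]
      exact List.Nodup.map (fun a b h => String.toList_inj.mp h) hn1
    have h2 : LB.Nodup := List.Nodup.filter _ (PySem.Set.nodup_ofList W)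
    rw [List.perm_ext_iff_of_nodup h1 h2]
    intro q
    simp only [List.mem_map, hLA, hLB, List.mem_filter]
    constructor
    · rintro ⟨kv, ⟨hmem, hc⟩, rfl⟩
      refine ⟨(hQW kv.1.toList).1 hc, ?_⟩
      exact (hcontains kv.1.toList).2 ⟨kv, hmem, by simp⟩
    · rintro ⟨hS, hc⟩
      obtain ⟨kv, hmem, hk⟩ := (hcontains q).1 hc
      have hkq : kv.1.toList = q := by rw [hk]; simp
      refine ⟨kv, ⟨hmem, ?_⟩, hkq⟩
      rw [hkq]
      exact (hQW q).2 hS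
  rw [hmapA]
  exact (hperm.map _).sum_eq
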